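-- pv_equiv track=rewrite | github.com/spotpan/GANN | strongtie_visualization.py | assign_primary_role
-- ===== SOURCE A (Python) =====
-- def assign_primary_role(roles):
--     """Assign each node a primary role based on a predefined priority."""
--     node_to_role = {}
--     priority_order = ['successor', 'predecessor', 'predecessor_successor']
--
--     for role in priority_order:
--         for node in roles[role]:
--             if node not in node_to_role:
--                 node_to_role[node] = role
--
--     primary_roles = {role: [] for role in roles}
--     for node, role in node_to_role.items():
--         primary_roles[role].append(node)
--
--     return primary_roles
-- ===== SOURCE B (Python) =====
-- def _bucket(nodes, higher):
--     """First occurrences of nodes, minus everything in the higher-priority lists."""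
--     excluded = set(higher)
--     return [n for n in dict.fromkeys(nodes) if n not in excluded]
--
-- def assign_primary_role(roles):
--     """Assign each node a primary role based on a predefined priority."""
--     succ = roles['successor']
--     pred = roles['predecessor']
--     both = roles['predecessor_successor']
--     buckets = {
--         'successor': _bucket(succ, []),
--         'predecessor': _bucket(pred, succ),
--         'predecessor_successor': _bucket(both, succ + pred),
--     }
--     return {role: buckets.get(role, []) for role in roles}
-- ===== Notes on version B (the rewrite author's own statement) =====
-- stated objective: alternative
-- what changed: B computes the three buckets independently and declaratively -- each bucket is the ordered dedup of its own role list minus a static set of all nodes in strictly higher-priority lists -- instead of A's stateful sweep that builds a node-to-role map and then regroups it.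
import Mathlib
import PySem

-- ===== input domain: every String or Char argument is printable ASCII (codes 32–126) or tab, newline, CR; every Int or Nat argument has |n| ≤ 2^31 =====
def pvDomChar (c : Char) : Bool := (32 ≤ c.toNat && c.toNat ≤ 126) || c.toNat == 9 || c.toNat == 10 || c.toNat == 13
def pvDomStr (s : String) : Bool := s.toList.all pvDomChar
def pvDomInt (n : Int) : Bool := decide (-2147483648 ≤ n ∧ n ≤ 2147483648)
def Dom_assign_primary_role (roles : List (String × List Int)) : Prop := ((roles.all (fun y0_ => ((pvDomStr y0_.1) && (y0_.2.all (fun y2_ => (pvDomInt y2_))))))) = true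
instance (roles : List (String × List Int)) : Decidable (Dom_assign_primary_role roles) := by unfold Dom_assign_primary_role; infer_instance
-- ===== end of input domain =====

-- B computes each bucket independently (ordered dedup of its role list minus the set of all
-- higher-priority nodes), replacing A's node-to-role map plus regrouping pass (objective: alternative).


-- ===== PORT A =====
-- roles[role] is a PySem.Dict lookup; under Pre_ the three priority keys are present,
-- so the `getD … []` defaults never fire (Python raises KeyError exactly outside Pre_).
def assign_primary_role (roles : List (String × List Int)) : List (String × List Int) :=
  let d := PySem.Dict.mk roles
  let priority_order : List String := ["successor", "predecessor", "predecessor_successor"]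
  let node_to_role : PySem.Dict Int String :=
    priority_order.foldl (fun nd role =>
      (d.getD role []).foldl (fun nd node =>
        if nd.contains node then nd else nd.insert node role) nd)
      PySem.Dict.empty
  let primary_roles : PySem.Dict String (List Int) :=
    roles.foldl (fun pr p => pr.insert p.1 ([] : List Int)) PySem.Dict.empty
  let primary_roles :=
    node_to_role.items.foldl (fun pr p => pr.modify p.2 [] (· ++ [p.1])) primary_roles
  primary_roles.items

-- ===== PORT B =====
-- _bucket(nodes, higher): dict.fromkeys → PySem.List.dedup; 'n not in set(higher)' → Set membership.
def pvBucket (nodes : List Int) (higher : List Int) : List Int :=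
  let excluded : PySem.Set Int := PySem.Set.ofList higher
  (PySem.List.dedup nodes).filter (fun n => !(PySem.Set.contains excluded n))

def assign_primary_role_alt (roles : List (String × List Int)) : List (String × List Int) :=
  let d := PySem.Dict.mk roles
  let succ := d.getD "successor" []
  let pred := d.getD "predecessor" []
  let both := d.getD "predecessor_successor" []
  let buckets : PySem.Dict String (List Int) :=
    ((PySem.Dict.empty.insert "successor" (pvBucket succ [])).insert
        "predecessor" (pvBucket pred succ)).insert
      "predecessor_successor" (pvBucket both (succ ++ pred))
  (roles.foldl (fun pr p => pr.insert p.1 (buckets.getD p.1 [])) PySem.Dict.empty).items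

-- ===== PRECONDITION & SPEC =====
-- Pre_ excludes exactly the inputs on which Python A raises KeyError:
-- dicts missing one of the three priority keys.
def Pre_assign_primary_role (roles : List (String × List Int)) : Prop :=
  "successor" ∈ roles.map Prod.fst ∧ "predecessor" ∈ roles.map Prod.fst ∧
    "predecessor_successor" ∈ roles.map Prod.fst
instance (roles : List (String × List Int)) : Decidable (Pre_assign_primary_role roles) := by
  unfold Pre_assign_primary_role; infer_instance

def pvWitness_assign_primary_role : (List (String × List Int)) :=
  [("successor", [1, 2]), ("predecessor", [2, 3]), ("predecessor_successor", [4])]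

def Spec_assign_primary_role (roles : List (String × List Int)) (out : List (String × List Int)) : Prop := out = assign_primary_role_alt roles
instance (roles : List (String × List Int)) (out : List (String × List Int)) : Decidable (Spec_assign_primary_role roles out) := by unfold Spec_assign_primary_role; infer_instance

-- ===== CLAIM (what is proved, stated in full; the proofs are below) =====
def Claim_equal_assign_primary_role : Prop := ∀ (roles : List (String × List Int)), Dom_assign_primary_role roles → Pre_assign_primary_role roles → Spec_assign_primary_role roles (assign_primary_role roles)


-- ===== LEMMAS AND PROOFS =====

lemma pv_inner (role : String) (nd : PySem.Dict Int String) (nodes : List Int) :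
    (nodes.foldl (fun nd node => if nd.contains node then nd else nd.insert node role) nd).items
      = nd.items ++ ((PySem.Set.ofList nodes).filter (fun n => !decide (n ∈ nd.keys))).map
          (fun n => (n, role)) := by
  induction nodes using List.reverseRecOn with
  | nil => simp [PySem.Set.ofList_nil]
  | append_singleton xs x ih =>
    rw [List.foldl_append, List.foldl_cons, List.foldl_nil]
    have hkeys : (xs.foldl (fun nd node => if nd.contains node then nd else nd.insert node role) nd).keys
        = nd.keys ++ (PySem.Set.ofList xs).filter (fun n => !decide (n ∈ nd.keys)) := by
      simp only [PySem.Dict.keys, ih, List.map_append, List.map_map]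
      simp [Function.comp_def]
    have hcont : (xs.foldl (fun nd node => if nd.contains node then nd else nd.insert node role) nd).contains x
        = decide (x ∈ nd.keys ∨ x ∈ xs) := by
      rw [PySem.Dict.contains_eq_decide_mem_keys, hkeys]
      simp [List.mem_filter, PySem.Set.mem_ofList]
      by_cases h : x ∈ nd.keys <;> simp [h]
    rw [PySem.Set.ofList_append_singleton]
    by_cases hxs : x ∈ xs
    · rw [PySem.Set.add_of_mem (by simpa [PySem.Set.mem_ofList] using hxs)]
      simp [hcont, hxs, ih]
    · rw [PySem.Set.add_of_not_mem (by simpa [PySem.Set.mem_ofList] using hxs)]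
      by_cases hk : x ∈ nd.keys
      · simp [hcont, hk, ih, List.filter_append, hxs]
      · have hc : (xs.foldl (fun nd node => if nd.contains node then nd else nd.insert node role) nd).contains x = false := by
          simp [hcont, hk, hxs]
        rw [if_neg (by simp [hc]), PySem.Dict.items_insert, hc, ih]
        simp [List.filter_append, hk]

lemma pv_getD_fold_insert (f : String → List Int) (k : String) (rs : List (String × List Int)) :
    ∀ d : PySem.Dict String (List Int),
      (rs.foldl (fun pr p => pr.insert p.1 (f p.1)) d).getD k []
        = if k ∈ rs.map Prod.fst then f k else d.getD k [] := by
  induction rs with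
  | nil => intro d; simp
  | cons a rest ih =>
    intro d
    rw [List.foldl_cons, ih]
    by_cases h : k ∈ rest.map Prod.fst
    · simp [h]
    · by_cases hk : k = a.1 <;> simp [h, hk, PySem.Dict.getD_insert]

lemma pv_block (r k : String) (l : List Int) :
    (((l.map (fun n => (r, n))).filter (fun p => p.1 == k)).map Prod.snd)
      = if r = k then l else [] := by
  by_cases h : r = k <;> simp [List.filter_map, Function.comp_def, h]


-- pvBucket with the Set membership test rewritten to plain list membership
lemma pv_bucket_eq (nodes higher : List Int) :
    pvBucket nodes higher
      = (PySem.Set.ofList nodes).filter (fun n => !decide (n ∈ higher)) := by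
  simp only [pvBucket, PySem.List.dedup_eq_ofList]
  apply List.filter_congr
  intro a _
  simp [PySem.Set.mem_ofList]

-- A's node_to_role items, in closed form
lemma pv_ntr (L1 L2 L3 : List Int) :
    (L3.foldl (fun nd node => if nd.contains node then nd else nd.insert node "predecessor_successor")
      (L2.foldl (fun nd node => if nd.contains node then nd else nd.insert node "predecessor")
        (L1.foldl (fun nd node => if nd.contains node then nd else nd.insert node "successor")
          PySem.Dict.empty))).items
    = (PySem.Set.ofList L1).map (fun n => (n, "successor"))
      ++ ((PySem.Set.ofList L2).filter (fun n => !decide (n ∈ L1))).map (fun n => (n, "predecessor"))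
      ++ ((PySem.Set.ofList L3).filter (fun n => !decide (n ∈ L1 ∨ n ∈ L2))).map
          (fun n => (n, "predecessor_successor")) := by
  have h1 := pv_inner "successor" PySem.Dict.empty L1
  have e1 : (L1.foldl (fun nd node => if nd.contains node then nd else nd.insert node "successor")
      PySem.Dict.empty).items = (PySem.Set.ofList L1).map (fun n => (n, "successor")) := by
    simpa [PySem.Dict.keys_empty] using h1
  have k1 : (L1.foldl (fun nd node => if nd.contains node then nd else nd.insert node "successor")
      PySem.Dict.empty).keys = (PySem.Set.ofList L1 : List Int) := by
    simp [PySem.Dict.keys, e1, Function.comp_def]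
  have h2 := pv_inner "predecessor"
    (L1.foldl (fun nd node => if nd.contains node then nd else nd.insert node "successor")
      PySem.Dict.empty) L2
  rw [k1] at h2
  have f2 : (PySem.Set.ofList L2).filter (fun n => !decide (n ∈ (PySem.Set.ofList L1 : List Int)))
      = (PySem.Set.ofList L2).filter (fun n => !decide (n ∈ L1)) := by
    apply List.filter_congr; intro a _; simp [PySem.Set.mem_ofList]
  rw [f2, e1] at h2
  have k2 : (L2.foldl (fun nd node => if nd.contains node then nd else nd.insert node "predecessor")
      (L1.foldl (fun nd node => if nd.contains node then nd else nd.insert node "successor")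
        PySem.Dict.empty)).keys
      = (PySem.Set.ofList L1 : List Int) ++ (PySem.Set.ofList L2).filter (fun n => !decide (n ∈ L1)) := by
    simp [PySem.Dict.keys, h2, Function.comp_def]
  have h3 := pv_inner "predecessor_successor"
    (L2.foldl (fun nd node => if nd.contains node then nd else nd.insert node "predecessor")
      (L1.foldl (fun nd node => if nd.contains node then nd else nd.insert node "successor")
        PySem.Dict.empty)) L3
  rw [k2] at h3
  have f3 : (PySem.Set.ofList L3).filter (fun n =>
        !decide (n ∈ (PySem.Set.ofList L1 : List Int) ++ (PySem.Set.ofList L2).filter (fun n => !decide (n ∈ L1))))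
      = (PySem.Set.ofList L3).filter (fun n => !decide (n ∈ L1 ∨ n ∈ L2)) := by
    apply List.filter_congr; intro a _
    simp [PySem.Set.mem_ofList, List.mem_filter]
    by_cases h : a ∈ L1 <;> simp [h]
  rw [f3, h2] at h3
  rw [h3, List.append_assoc]

theorem assign_primary_role_spec : Claim_equal_assign_primary_role := by
  intro roles _ hpre
  obtain ⟨hs, hp, hb⟩ := hpre
  show assign_primary_role roles = assign_primary_role_alt roles
  simp only [assign_primary_role, assign_primary_role_alt, List.foldl_cons, List.foldl_nil]
  set d := PySem.Dict.mk roles with hd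
  set L1 := d.getD "successor" [] with hL1
  set L2 := d.getD "predecessor" [] with hL2
  set L3 := d.getD "predecessor_successor" [] with hL3
  set B1 := (PySem.Set.ofList L1 : List Int) with hB1
  set B2 := (PySem.Set.ofList L2).filter (fun n => !decide (n ∈ L1)) with hB2
  set B3 := (PySem.Set.ofList L3).filter (fun n => !decide (n ∈ L1 ∨ n ∈ L2)) with hB3
  -- the swapped item list of node_to_role
  have hntr := pv_ntr L1 L2 L3
  -- init dict (primary_roles before regrouping)
  set init := roles.foldl (fun pr p => pr.insert p.1 ([] : List Int)) PySem.Dict.empty with hinit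
  have hinitkeys : init.keys = PySem.Set.ofList (roles.map Prod.fst) := by
    rw [hinit, PySem.Dict.keys_foldl_insert_key]
    simp [PySem.Dict.keys_empty, PySem.Set.update_nil_left]
  have hinitnodup : init.keys.Nodup := by
    rw [hinitkeys]; exact PySem.Set.nodup_ofList _
  rw [hntr]
  set LB := B1.map (fun n => (n, "successor")) ++ B2.map (fun n => (n, "predecessor"))
      ++ B3.map (fun n => (n, "predecessor_successor")) with hLB
  set LS := B1.map (fun n => ("successor", n)) ++ B2.map (fun n => ("predecessor", n))
      ++ B3.map (fun n => ("predecessor_successor", n)) with hLS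
  have hswap : LB.foldl (fun pr p => pr.modify p.2 [] fun x => x ++ [p.1]) init
      = LS.foldl (fun pr q => pr.modify q.1 [] fun x => x ++ [q.2]) init := by
    rw [show LS = LB.map Prod.swap from by
      simp [hLB, hLS, List.map_append, List.map_map, Function.comp_def, Prod.swap]]
    rw [List.foldl_map]
    rfl
  rw [hswap]
  -- keys of the three string blocks are among roles' keys
  have hLSfst : ∀ y ∈ LS.map Prod.fst, y ∈ roles.map Prod.fst := by
    intro y hy
    simp only [hLS, List.map_append, List.map_map, List.mem_append, List.mem_map,
      Function.comp_def] at hy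
    rcases hy with (⟨_, _, rfl⟩ | ⟨_, _, rfl⟩) | ⟨_, _, rfl⟩
    · exact hs
    · exact hp
    · exact hb
  -- keys of the A-side result
  have hFAkeys : (LS.foldl (fun pr q => pr.modify q.1 [] fun x => x ++ [q.2]) init).keys
      = init.keys := by
    rw [PySem.Dict.keys_foldl_modify_key]
    rw [PySem.Set.update_eq_append_filter]
    have : (PySem.Set.ofList (LS.map Prod.fst)).filter
        (fun y => !(PySem.Set.contains init.keys y)) = [] := by
      apply List.filter_eq_nil_iff.mpr
      intro y hy
      have hy' : y ∈ roles.map Prod.fst := hLSfst y ((PySem.Set.mem_ofList _ _).mp hy)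
      have : y ∈ init.keys := by rw [hinitkeys]; exact (PySem.Set.mem_ofList _ _).mpr hy'
      simpa using this
    rw [this, List.append_nil]
  have hFAnodup : (LS.foldl (fun pr q => pr.modify q.1 [] fun x => x ++ [q.2]) init).keys.Nodup := by
    rw [hFAkeys]; exact hinitnodup
  -- keys of the B-side result
  have hFBkeys : (roles.foldl (fun pr p => pr.insert p.1
      ((((PySem.Dict.empty.insert "successor" (pvBucket L1 [])).insert "predecessor"
        (pvBucket L2 L1)).insert "predecessor_successor" (pvBucket L3 (L1 ++ L2))).getD p.1 []))
      PySem.Dict.empty).keys = PySem.Set.ofList (roles.map Prod.fst) := by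
    rw [PySem.Dict.keys_foldl_insert_key]
    simp [PySem.Dict.keys_empty, PySem.Set.update_nil_left]
  have hFBnodup : (roles.foldl (fun pr p => pr.insert p.1
      ((((PySem.Dict.empty.insert "successor" (pvBucket L1 [])).insert "predecessor"
        (pvBucket L2 L1)).insert "predecessor_successor" (pvBucket L3 (L1 ++ L2))).getD p.1 []))
      PySem.Dict.empty).keys.Nodup := by
    rw [hFBkeys]; exact PySem.Set.nodup_ofList _
  rw [PySem.Dict.items_eq_map_keys _ hFAnodup ([] : List Int),
      PySem.Dict.items_eq_map_keys _ hFBnodup ([] : List Int),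
      hFAkeys, hinitkeys, hFBkeys]
  apply List.map_congr_left
  intro k hk
  have hkmem : k ∈ roles.map Prod.fst := (PySem.Set.mem_ofList _ _).mp hk
  have hAval : (LS.foldl (fun pr q => pr.modify q.1 [] fun x => x ++ [q.2]) init).getD k []
      = (if "successor" = k then B1 else []) ++ (if "predecessor" = k then B2 else [])
        ++ (if "predecessor_successor" = k then B3 else []) := by
    rw [PySem.Dict.getD_foldl_modify_append]
    have hinitval : init.getD k [] = [] := by
      rw [hinit, pv_getD_fold_insert (fun _ => ([] : List Int))]
      split <;> simp
    rw [hinitval, List.nil_append, hLS]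
    simp only [List.filter_append, List.map_append, pv_block]
  have hBval : (roles.foldl (fun pr p => pr.insert p.1
      ((((PySem.Dict.empty.insert "successor" (pvBucket L1 [])).insert "predecessor"
        (pvBucket L2 L1)).insert "predecessor_successor" (pvBucket L3 (L1 ++ L2))).getD p.1 []))
      PySem.Dict.empty).getD k []
      = (((PySem.Dict.empty.insert "successor" (pvBucket L1 [])).insert "predecessor"
        (pvBucket L2 L1)).insert "predecessor_successor" (pvBucket L3 (L1 ++ L2))).getD k [] := by
    rw [pv_getD_fold_insert (fun s =>
      ((((PySem.Dict.empty.insert "successor" (pvBucket L1 [])).insert "predecessor"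
        (pvBucket L2 L1)).insert "predecessor_successor" (pvBucket L3 (L1 ++ L2))).getD s []))]
    rw [if_pos hkmem]
  rw [hAval, hBval]
  have hbuck1 : pvBucket L1 [] = B1 := by
    rw [pv_bucket_eq, hB1]; simp
  have hbuck2 : pvBucket L2 L1 = B2 := by
    rw [pv_bucket_eq, hB2]
  have hbuck3 : pvBucket L3 (L1 ++ L2) = B3 := by
    rw [pv_bucket_eq, hB3]
    apply List.filter_congr; intro a _; simp
  simp only [PySem.Dict.getD_insert, PySem.Dict.getD_empty]
  by_cases h3 : k = "predecessor_successor"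
  · subst h3; simp [hbuck3]
  · by_cases h2 : k = "predecessor"
    · subst h2; simp [hbuck2]
    · by_cases h1 : k = "successor"
      · subst h1; simp [hbuck1]
      · have h1' : ¬("successor" = k) := fun h => h1 h.symm
        have h2' : ¬("predecessor" = k) := fun h => h2 h.symm
        have h3' : ¬("predecessor_successor" = k) := fun h => h3 h.symm
        simp [h1, h2, h3, h1', h2', h3']
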